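-- pv_equiv track=rewrite | github.com/ksomemo/Competitive-programming | atcoder/abc/044/C.py | editorial_2d
-- ===== SOURCE A (Python) =====
-- def editorial_2d(N, A, X):
--     """
--     dp[N][sum]
--     N枚の選択肢, 合計値
--     """
--     # X[i] がすべて0なら -A することで最低値になりうる
--     # よって2倍確保して対応
--     max_sum = 2 * (N * 50)
--     dp = [[0] * (max_sum + 1) for _ in range(N+1)]
--     # 真ん中の位置を0扱い
--     dp[0][max_sum // 2] = 1
--
--     for i in range(1, N+1):
--         for k in range(max_sum + 1):
--             v = dp[i-1][k]
--             s = k - (X[i-1] - A)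
--             if 0 <= s <= max_sum:
--                 v += dp[i-1][s]
--
--             dp[i][k] += v
--
--     # 0枚のとき合計0はあり得るが、問題文より
--     # これらのカードの中から 1枚以上を選び、
--     # 選んだカードに書かれた整数の平均をちょうど Aにしたい
--     # よって -1 しないといけない
--     # 今回の組合せは、掛け算で増えないためそのまま減算で良い(はず)
--     ans = dp[N][max_sum // 2] - 1
--
--     return ans
-- ===== SOURCE B (Python) =====
-- def editorial_2d(N, A, X):
--     # Top-down memoized recursion: ways(i, s) counts the ways to pick among the
--     # cards X[i:N], starting from centered sum s, ending at centered sum 0, with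
--     # every intermediate sum kept inside A's window [-M, M]; the answer is
--     # ways(0, 0) minus the empty selection.  Only states actually reachable from
--     # (0, 0) are ever computed.
--     M = N * 50
--     memo = {}
--
--     def ways(i, s):
--         if i == N:
--             return 1 if s == 0 else 0
--         key = (i, s)
--         if key not in memo:
--             r = ways(i + 1, s)
--             t = s + X[i] - A
--             if -M <= t <= M:
--                 r += ways(i + 1, t)
--             memo[key] = r
--         return memo[key]
--
--     return ways(0, 0) - 1
-- ===== Notes on version B (the rewrite author's own statement) =====
-- stated objective: alternative
-- what changed: Replaces A's bottom-up dense (N+1) x (100N+1) reachability table (dp[i][k] = ways to reach centered sum k-M with the first i cards) by a demand-driven top-down memoized recursion over suffixes (ways(rest, s) = completions from state s to 0), which only ever visits states actually reachable from the start instead of sweeping every cell of every row.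
import Mathlib
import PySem

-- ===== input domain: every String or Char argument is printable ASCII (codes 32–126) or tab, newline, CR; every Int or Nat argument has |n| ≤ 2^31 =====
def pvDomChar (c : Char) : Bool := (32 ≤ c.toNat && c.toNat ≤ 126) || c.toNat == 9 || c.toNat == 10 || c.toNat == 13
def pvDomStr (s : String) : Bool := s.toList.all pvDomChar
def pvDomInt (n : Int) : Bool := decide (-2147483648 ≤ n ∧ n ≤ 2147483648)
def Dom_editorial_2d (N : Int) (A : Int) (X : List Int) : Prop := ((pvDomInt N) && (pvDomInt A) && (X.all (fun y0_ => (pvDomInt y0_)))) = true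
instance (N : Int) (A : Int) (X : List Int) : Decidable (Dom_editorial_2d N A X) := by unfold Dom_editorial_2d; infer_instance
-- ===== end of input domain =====

-- B replaces A's bottom-up dense reachability table by a top-down memoized
-- recursion over suffixes that only visits reachable states (alternative decomposition).

-- ===== PORT A =====
-- inner loop 'for k in range(max_sum+1): … dp[i][k] += v' — row i starts all zero, each k
-- is written once, so the row is the list of the computed v's in the same k order
def pvRowA (maxSum c : Int) (prev : List Int) : List Int :=
  (PySem.List.pyRange 0 (maxSum + 1)).map (fun k =>
    let v := PySem.List.pyGetD prev k 0
    let s := k - c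
    if decide (0 ≤ s) && decide (s ≤ maxSum) then v + PySem.List.pyGetD prev s 0 else v)

-- pyGetD defaults are only reachable where the Python raises IndexError (excluded by Pre_)
def editorial_2d (N : Int) (A : Int) (X : List Int) : Int :=
  let maxSum := 2 * (N * 50)
  let dp : List (List Int) :=
    (PySem.List.pyRange 0 (N + 1)).map (fun _ => PySem.List.pyRepeat [(0 : Int)] (maxSum + 1))
  let mid := PySem.Int.floordiv maxSum 2
  let dp := PySem.List.pySetD dp 0 (PySem.List.pySetD (PySem.List.pyGetD dp 0 []) mid 1)
  let dp := (PySem.List.pyRange 1 (N + 1)).foldl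
    (fun dp i =>
      PySem.List.pySetD dp i
        (pvRowA maxSum (PySem.List.pyGetD X (i - 1) 0 - A) (PySem.List.pyGetD dp (i - 1) []))) dp
  PySem.List.pyGetD (PySem.List.pyGetD dp N []) mid 0 - 1

-- ===== PORT B =====
-- 'def ways(i, s)': memo keyed by (i, s); 'key not in memo' is the none branch;
-- the Nat fuel only bounds the recursion depth (N - i steps on admitted inputs)
def pvWays (A M N : Int) (X : List Int) :
    Nat → Int → Int → PySem.Dict (Int × Int) Int → Int × PySem.Dict (Int × Int) Int
  | fuel, i, s, memo =>
    if i = N then (if s = 0 then 1 else 0, memo)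
    else
      match fuel with
      | 0 => (0, memo)  -- fuel guard only: never reached on inputs satisfying Pre_
      | fuel + 1 =>
        match memo.get? (i, s) with
        | some v => (v, memo)
        | none =>
          let p1 := pvWays A M N X fuel (i + 1) s memo
          let p2 := if decide (-M ≤ s + PySem.List.pyGetD X i 0 - A) &&
                       decide (s + PySem.List.pyGetD X i 0 - A ≤ M)
                    then
                      let q := pvWays A M N X fuel (i + 1) (s + PySem.List.pyGetD X i 0 - A) p1.2
                      (p1.1 + q.1, q.2)
                    else p1
          (p2.1, p2.2.insert (i, s) p2.1)

def editorial_2d_alt (N : Int) (A : Int) (X : List Int) : Int :=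
  let M := N * 50
  (pvWays A M N X N.toNat 0 0 PySem.Dict.empty).1 - 1

-- ===== PRECONDITION & SPEC =====
-- A raises IndexError when N < 0 (dp[0] on an empty table) or when 1 ≤ N and len(X) < N
def Pre_editorial_2d (N : Int) (A : Int) (X : List Int) : Prop :=
  0 ≤ N ∧ N ≤ (X.length : Int)
instance (N : Int) (A : Int) (X : List Int) : Decidable (Pre_editorial_2d N A X) := by
  unfold Pre_editorial_2d; infer_instance

def pvWitness_editorial_2d : Int × Int × List Int := (2, 5, [5, 5])

def Spec_editorial_2d (N : Int) (A : Int) (X : List Int) (out : Int) : Prop :=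
  out = editorial_2d_alt N A X
instance (N : Int) (A : Int) (X : List Int) (out : Int) : Decidable (Spec_editorial_2d N A X out) := by
  unfold Spec_editorial_2d; infer_instance

-- ===== CLAIM (what is proved, stated in full; the proofs are below) =====
def Claim_equal_editorial_2d : Prop := ∀ (N : Int) (A : Int) (X : List Int),
  Dom_editorial_2d N A X → Pre_editorial_2d N A X →
  Spec_editorial_2d N A X (editorial_2d N A X)

-- ===== LEMMAS AND PROOFS =====

-- plain (memo-free) meaning of B's recursion
def pvG (A M : Int) : List Int → Int → Int
  | [], s => if s = 0 then 1 else 0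
  | x :: rest, s =>
      pvG A M rest s +
        (if -M ≤ s + x - A ∧ s + x - A ≤ M then pvG A M rest (s + x - A) else 0)

-- every memo entry (i, s) is the plain value on the cards from index i on
def pvMemoOK (A M N : Int) (X : List Int) (memo : PySem.Dict (Int × Int) Int) : Prop :=
  ∀ i s v, memo.get? (i, s) = some v →
    0 ≤ i ∧ v = pvG A M ((X.take N.toNat).drop i.toNat) s

lemma pvWaysOK (A M N : Int) (X : List Int) (hNX : N.toNat ≤ X.length) :
    ∀ (fuel : Nat) (i : Int), 0 ≤ i → i ≤ N → (N - i).toNat ≤ fuel →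
    ∀ (s : Int) (memo : PySem.Dict (Int × Int) Int), pvMemoOK A M N X memo →
      (pvWays A M N X fuel i s memo).1 = pvG A M ((X.take N.toNat).drop i.toNat) s ∧
      pvMemoOK A M N X (pvWays A M N X fuel i s memo).2 := by
  intro fuel
  induction fuel with
  | zero =>
      intro i h0 hN hf s memo hm
      have hiN : i = N := by omega
      subst hiN
      have hdrop : ((X.take i.toNat).drop i.toNat) = [] := by
        apply List.drop_eq_nil_of_le
        rw [List.length_take]
        omega
      rw [pvWays, if_pos rfl, hdrop]
      exact ⟨rfl, hm⟩
  | succ f ih =>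
      intro i h0 hN hf s memo hm
      by_cases hiN : i = N
      · subst hiN
        have hdrop : ((X.take i.toNat).drop i.toNat) = [] := by
          apply List.drop_eq_nil_of_le
          rw [List.length_take]
          omega
        rw [pvWays, if_pos rfl, hdrop]
        exact ⟨rfl, hm⟩
      · have hiltN : i < N := by omega
        have hilen : i.toNat < (X.take N.toNat).length := by
          rw [List.length_take]; omega
        have hcons : (X.take N.toNat).drop i.toNat
            = (X.take N.toNat)[i.toNat] :: (X.take N.toNat).drop (i.toNat + 1) := by
          exact List.drop_eq_getElem_cons hilen
        have hXi : PySem.List.pyGetD X i 0 = (X.take N.toNat)[i.toNat]'hilen := by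
          rw [PySem.List.pyGetD_of_nonneg _ _ h0,
            List.getD_eq_getElem _ _ (by omega : i.toNat < X.length),
            List.getElem_take]
        have hdropsucc : (X.take N.toNat).drop (i.toNat + 1)
            = (X.take N.toNat).drop (i + 1).toNat := by
          congr 1
          omega
        have hGstep : pvG A M ((X.take N.toNat).drop i.toNat) s
            = pvG A M ((X.take N.toNat).drop (i + 1).toNat) s +
              (if -M ≤ s + PySem.List.pyGetD X i 0 - A ∧ s + PySem.List.pyGetD X i 0 - A ≤ M
               then pvG A M ((X.take N.toNat).drop (i + 1).toNat)
                 (s + PySem.List.pyGetD X i 0 - A) else 0) := by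
          rw [hcons, pvG, hXi, hdropsucc]
        rw [pvWays, if_neg hiN]
        simp only []
        cases hget : memo.get? (i, s) with
        | some v =>
            refine ⟨?_, hm⟩
            exact (hm _ _ _ hget).2
        | none =>
            simp only []
            obtain ⟨h1, hm1⟩ := ih (i + 1) (by omega) (by omega) (by omega) s memo hm
            by_cases hw : -M ≤ s + PySem.List.pyGetD X i 0 - A ∧ s + PySem.List.pyGetD X i 0 - A ≤ M
            · have hwb : (decide (-M ≤ s + PySem.List.pyGetD X i 0 - A) &&
                  decide (s + PySem.List.pyGetD X i 0 - A ≤ M)) = true := by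
                simp only [Bool.and_eq_true, decide_eq_true_eq]; exact hw
              obtain ⟨h2, hm2⟩ := ih (i + 1) (by omega) (by omega) (by omega)
                (s + PySem.List.pyGetD X i 0 - A) (pvWays A M N X f (i + 1) s memo).2 hm1
              rw [if_pos hwb]
              simp only []
              have hval : (pvWays A M N X f (i + 1) s memo).1 +
                  (pvWays A M N X f (i + 1) (s + PySem.List.pyGetD X i 0 - A)
                    (pvWays A M N X f (i + 1) s memo).2).1
                  = pvG A M ((X.take N.toNat).drop i.toNat) s := by
                rw [h1, h2, hGstep, if_pos hw]
              refine ⟨hval, ?_⟩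
              intro j s' v' hv'
              rw [PySem.Dict.get?_insert] at hv'
              by_cases he : (j, s') = (i, s)
              · rw [if_pos he] at hv'
                cases hv'
                obtain ⟨hj, hs⟩ := Prod.mk.injEq .. ▸ he
                subst hj; subst hs
                exact ⟨h0, hval⟩
              · rw [if_neg he] at hv'
                exact hm2 _ _ _ hv'
            · have hwb : ¬ ((decide (-M ≤ s + PySem.List.pyGetD X i 0 - A) &&
                  decide (s + PySem.List.pyGetD X i 0 - A ≤ M)) = true) := by
                simp only [Bool.and_eq_true, decide_eq_true_eq]; exact hw
              rw [if_neg hwb]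
              have hval : (pvWays A M N X f (i + 1) s memo).1
                  = pvG A M ((X.take N.toNat).drop i.toNat) s := by
                rw [h1, hGstep, if_neg hw, add_zero]
              refine ⟨hval, ?_⟩
              intro j s' v' hv'
              rw [PySem.Dict.get?_insert] at hv'
              by_cases he : (j, s') = (i, s)
              · rw [if_pos he] at hv'
                cases hv'
                obtain ⟨hj, hs⟩ := Prod.mk.injEq .. ▸ he
                subst hj; subst hs
                exact ⟨h0, hval⟩
              · rw [if_neg he] at hv'
                exact hm1 _ _ _ hv'

-- the dense rows iterated over the cards (what A's row i is, by the table lemma below)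
def pvDense (Av M : Int) (cs : List Int) (r : List Int) : List Int :=
  cs.foldl (fun r x => pvRowA (2 * M) (x - Av) r) r

def pvRow0 (M : Int) : List Int := (List.replicate (2 * M + 1).toNat 0).set M.toNat 1

def pvTable0 (n : Nat) (M : Int) : List (List Int) :=
  (List.replicate (n + 1) (List.replicate (2 * M + 1).toNat 0)).set 0 (pvRow0 M)

def pvStepA (A M : Int) (X : List Int) (dp : List (List Int)) (i : Int) : List (List Int) :=
  PySem.List.pySetD dp i
    (pvRowA (2 * M) (PySem.List.pyGetD X (i - 1) 0 - A) (PySem.List.pyGetD dp (i - 1) []))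

lemma pvRowAGetD (M c : Int) (r : List Int) (k : Int) (hk0 : 0 ≤ k) (hk1 : k ≤ 2 * M) :
    PySem.List.pyGetD (pvRowA (2 * M) c r) k 0
      = PySem.List.pyGetD r k 0 +
        (if 0 ≤ k - c ∧ k - c ≤ 2 * M then PySem.List.pyGetD r (k - c) 0 else 0) := by
  obtain ⟨kn, rfl⟩ : ∃ kn : Nat, k = (kn : Int) := ⟨k.toNat, (Int.toNat_of_nonneg hk0).symm⟩
  rw [pvRowA, show (2 * M + 1 : Int) = (((2 * M + 1).toNat : Nat) : Int) by omega,
    PySem.List.pyGetD_map_pyRange _ _ kn 0 (by omega)]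
  simp only []
  by_cases hs : 0 ≤ (kn : Int) - c ∧ (kn : Int) - c ≤ 2 * M
  · have hcond : (decide (0 ≤ (kn : Int) - c) && decide ((kn : Int) - c ≤ 2 * M)) = true := by
      simp only [Bool.and_eq_true, decide_eq_true_eq]
      exact hs
    rw [if_pos hcond, if_pos hs]
  · have hcond : ¬ ((decide (0 ≤ (kn : Int) - c) && decide ((kn : Int) - c ≤ 2 * M)) = true) := by
      simp only [Bool.and_eq_true, decide_eq_true_eq]
      exact hs
    rw [if_neg hcond, if_neg hs, add_zero]

-- weighted pairing of a window row with backward completions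
noncomputable def pvS (A M : Int) (r : List Int) (cs : List Int) : Int :=
  ∑ k ∈ Finset.Icc (0 : Int) (2 * M), PySem.List.pyGetD r k 0 * pvG A M cs (k - M)

lemma pvShiftSum (L c : Int) (f : Int → Int → Int) :
    (∑ k ∈ Finset.Icc (0 : Int) L, (if 0 ≤ k - c ∧ k - c ≤ L then f (k - c) k else 0))
      = ∑ j ∈ Finset.Icc (0 : Int) L, (if 0 ≤ j + c ∧ j + c ≤ L then f j (j + c) else 0) := by
  have hmap : Finset.Icc (0 : Int) L = Finset.map (addRightEmbedding c) (Finset.Icc (-c) (L - c)) := by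
    rw [Finset.map_add_right_Icc]
    congr 1 <;> ring
  conv_lhs => rw [hmap, Finset.sum_map]
  simp only [addRightEmbedding_apply]
  have h1 : ∀ j ∈ Finset.Icc (-c) (L - c),
      (if 0 ≤ j + c - c ∧ j + c - c ≤ L then f (j + c - c) (j + c) else 0)
        = (if (0 ≤ j ∧ j ≤ L) ∧ (0 ≤ j + c ∧ j + c ≤ L) then f j (j + c) else 0) := by
    intro j hj
    rw [Finset.mem_Icc] at hj
    rw [show j + c - c = j by ring]
    by_cases h : 0 ≤ j ∧ j ≤ L
    · rw [if_pos h, if_pos ⟨h, by omega⟩]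
    · rw [if_neg h, if_neg (by tauto)]
  rw [Finset.sum_congr rfl h1]
  have h2 : ∀ j ∈ Finset.Icc (0 : Int) L,
      (if 0 ≤ j + c ∧ j + c ≤ L then f j (j + c) else 0)
        = (if (0 ≤ j ∧ j ≤ L) ∧ (0 ≤ j + c ∧ j + c ≤ L) then f j (j + c) else 0) := by
    intro j hj
    rw [Finset.mem_Icc] at hj
    by_cases h : 0 ≤ j + c ∧ j + c ≤ L
    · rw [if_pos h, if_pos ⟨hj, h⟩]
    · rw [if_neg h, if_neg (by tauto)]
  rw [Finset.sum_congr rfl h2]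
  have hu1 : (∑ j ∈ Finset.Icc (-c) (L - c),
      (if (0 ≤ j ∧ j ≤ L) ∧ (0 ≤ j + c ∧ j + c ≤ L) then f j (j + c) else 0))
      = ∑ j ∈ Finset.Icc (-c) (L - c) ∪ Finset.Icc (0 : Int) L,
        (if (0 ≤ j ∧ j ≤ L) ∧ (0 ≤ j + c ∧ j + c ≤ L) then f j (j + c) else 0) := by
    apply Finset.sum_subset Finset.subset_union_left
    intro j hj hnj
    rw [Finset.mem_Icc] at hnj
    rw [if_neg (by intro h; exact hnj ⟨by omega, by omega⟩)]
  have hu2 : (∑ j ∈ Finset.Icc (0 : Int) L,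
      (if (0 ≤ j ∧ j ≤ L) ∧ (0 ≤ j + c ∧ j + c ≤ L) then f j (j + c) else 0))
      = ∑ j ∈ Finset.Icc (-c) (L - c) ∪ Finset.Icc (0 : Int) L,
        (if (0 ≤ j ∧ j ≤ L) ∧ (0 ≤ j + c ∧ j + c ≤ L) then f j (j + c) else 0) := by
    apply Finset.sum_subset Finset.subset_union_right
    intro j hj hnj
    rw [Finset.mem_Icc] at hnj
    rw [if_neg (by intro h; exact hnj ⟨by omega, by omega⟩)]
  rw [hu1, hu2]

lemma pvS_step (A M x : Int) (r cs : List Int) :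
    pvS A M (pvRowA (2 * M) (x - A) r) cs = pvS A M r (x :: cs) := by
  unfold pvS
  have hL : ∀ k ∈ Finset.Icc (0 : Int) (2 * M),
      PySem.List.pyGetD (pvRowA (2 * M) (x - A) r) k 0 * pvG A M cs (k - M)
        = PySem.List.pyGetD r k 0 * pvG A M cs (k - M)
          + (if 0 ≤ k - (x - A) ∧ k - (x - A) ≤ 2 * M
             then PySem.List.pyGetD r (k - (x - A)) 0 * pvG A M cs (k - M) else 0) := by
    intro k hk
    rw [Finset.mem_Icc] at hk
    rw [pvRowAGetD M (x - A) r k hk.1 hk.2, add_mul]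
    congr 1
    split_ifs
    · rfl
    · exact zero_mul _
  rw [Finset.sum_congr rfl hL, Finset.sum_add_distrib]
  have hR : ∀ k ∈ Finset.Icc (0 : Int) (2 * M),
      PySem.List.pyGetD r k 0 * pvG A M (x :: cs) (k - M)
        = PySem.List.pyGetD r k 0 * pvG A M cs (k - M)
          + (if 0 ≤ k + (x - A) ∧ k + (x - A) ≤ 2 * M
             then PySem.List.pyGetD r k 0 * pvG A M cs (k + (x - A) - M) else 0) := by
    intro k hk
    rw [Finset.mem_Icc] at hk
    rw [show pvG A M (x :: cs) (k - M) = pvG A M cs (k - M) +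
        (if -M ≤ (k - M) + x - A ∧ (k - M) + x - A ≤ M then pvG A M cs ((k - M) + x - A) else 0)
      from rfl, mul_add]
    congr 1
    rw [if_congr (show (-M ≤ (k - M) + x - A ∧ (k - M) + x - A ≤ M) ↔
        (0 ≤ k + (x - A) ∧ k + (x - A) ≤ 2 * M) by constructor <;> (intro h; exact ⟨by omega, by omega⟩))
      rfl rfl]
    split_ifs with h
    · rw [show k - M + x - A = k + (x - A) - M by ring]
    · exact mul_zero _
  rw [Finset.sum_congr rfl hR, Finset.sum_add_distrib]
  congr 1
  exact pvShiftSum (2 * M) (x - A) (fun a b => PySem.List.pyGetD r a 0 * pvG A M cs (b - M))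

lemma pvS_dense (A M : Int) (cs : List Int) :
    ∀ r : List Int, pvS A M (pvDense A M cs r) [] = pvS A M r cs := by
  induction cs with
  | nil => intro r; rfl
  | cons x t ih =>
      intro r
      rw [pvDense, List.foldl_cons, show t.foldl (fun r x => pvRowA (2 * M) (x - A) r)
        (pvRowA (2 * M) (x - A) r) = pvDense A M t (pvRowA (2 * M) (x - A) r) from rfl,
        ih, pvS_step]

lemma pvS_nil (A M : Int) (r : List Int) (hM : 0 ≤ M) :
    pvS A M r [] = PySem.List.pyGetD r M 0 := by
  unfold pvS
  have h : ∀ k ∈ Finset.Icc (0 : Int) (2 * M),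
      PySem.List.pyGetD r k 0 * pvG A M [] (k - M)
        = if k = M then PySem.List.pyGetD r k 0 else 0 := by
    intro k hk
    rw [show pvG A M [] (k - M) = (if k - M = 0 then 1 else 0) from rfl]
    split_ifs with h1 h2 h3
    · exact mul_one _
    · omega
    · omega
    · exact mul_zero _
  rw [Finset.sum_congr rfl h, Finset.sum_ite_eq' _ M]
  rw [if_pos (Finset.mem_Icc.2 ⟨hM, by omega⟩)]

lemma pvRow0GetD (M k : Int) (hM : 0 ≤ M) (hk0 : 0 ≤ k) (hk1 : k ≤ 2 * M) :
    PySem.List.pyGetD (pvRow0 M) k 0 = if k = M then 1 else 0 := by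
  rw [PySem.List.pyGetD_of_nonneg _ _ hk0, pvRow0]
  have hlt : k.toNat < ((List.replicate (2 * M + 1).toNat (0 : Int)).set M.toNat 1).length := by
    simp; omega
  rw [List.getD_eq_getElem _ _ hlt, List.getElem_set]
  split_ifs with h1 h2 h3
  · rfl
  · omega
  · omega
  · simp

lemma pvS_row0 (A M : Int) (cs : List Int) (hM : 0 ≤ M) :
    pvS A M (pvRow0 M) cs = pvG A M cs 0 := by
  unfold pvS
  have h : ∀ k ∈ Finset.Icc (0 : Int) (2 * M),
      PySem.List.pyGetD (pvRow0 M) k 0 * pvG A M cs (k - M)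
        = if k = M then pvG A M cs (k - M) else 0 := by
    intro k hk
    rw [Finset.mem_Icc] at hk
    rw [pvRow0GetD M k hM hk.1 hk.2]
    split_ifs
    · exact one_mul _
    · exact zero_mul _
  rw [Finset.sum_congr rfl h, Finset.sum_ite_eq' _ M]
  rw [if_pos (Finset.mem_Icc.2 ⟨hM, by omega⟩), show M - M = 0 by ring]

lemma pvTable (A : Int) (X : List Int) (n : Nat) (hn : n ≤ X.length) (M : Int) :
    ∀ j : Nat, j ≤ n →
      ((PySem.List.pyRange 1 ((j : Int) + 1)).foldl (pvStepA A M X) (pvTable0 n M)).length = n + 1 ∧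
      PySem.List.pyGetD
        ((PySem.List.pyRange 1 ((j : Int) + 1)).foldl (pvStepA A M X) (pvTable0 n M)) (j : Int) []
        = pvDense A M (X.take j) (pvRow0 M) := by
  intro j
  induction j with
  | zero =>
      intro _
      rw [PySem.List.pyRange_one_eq_nil (by omega)]
      refine ⟨by simp [pvTable0], ?_⟩
      rw [pvTable0]
      rw [show ((0 : Nat) : Int) = (0 : Int) by rfl] at *
      rw [PySem.List.pyGetD_of_nonneg _ _ (by omega)]
      simp [pvDense]
  | succ j ih =>
      intro hj
      obtain ⟨ihlen, ihrow⟩ := ih (by omega)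
      have hcast : ((j + 1 : Nat) : Int) + 1 = ((j : Int) + 1) + 1 := by push_cast; ring
      rw [hcast, PySem.List.pyRange_one_succ_right (by omega), List.foldl_append]
      set T := (PySem.List.pyRange 1 ((j : Int) + 1)).foldl (pvStepA A M X) (pvTable0 n M) with hT
      simp only [List.foldl_cons, List.foldl_nil]
      have hjm : (j : Int) + 1 - 1 = (j : Int) := by ring
      have hXj : PySem.List.pyGetD X ((j : Int)) 0 = X[j]'(by omega) := by
        rw [PySem.List.pyGetD_natCast, List.getD_eq_getElem _ _ (by omega)]
      have hrow : pvStepA A M X T ((j : Int) + 1)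
          = PySem.List.pySetD T ((j : Int) + 1)
              (pvRowA (2 * M) (X[j]'(by omega) - A) (pvDense A M (X.take j) (pvRow0 M))) := by
        rw [pvStepA, hjm, ihrow, hXj]
      rw [hrow, PySem.List.pySetD_of_nonneg _ _ (by omega)]
      have htn : ((j : Int) + 1).toNat = j + 1 := by omega
      rw [htn]
      refine ⟨by rw [List.length_set, ihlen], ?_⟩
      rw [PySem.List.pyGetD_natCast]
      have hlt : j + 1 < (T.set (j + 1)
          (pvRowA (2 * M) (X[j]'(by omega) - A) (pvDense A M (X.take j) (pvRow0 M)))).length := by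
        rw [List.length_set, ihlen]; omega
      rw [List.getD_eq_getElem _ _ hlt, List.getElem_set, if_pos rfl]
      have htake : X.take (j + 1) = X.take j ++ [X[j]'(by omega)] := by
        rw [List.take_add_one, List.getElem?_eq_getElem (by omega)]
        rfl
      rw [htake]
      simp only [pvDense, List.foldl_append, List.foldl_cons, List.foldl_nil]

-- ===== VERDICT (by name: the statement is the Claim_ definition above) =====
theorem editorial_2d_spec : Claim_equal_editorial_2d := by
  intro N A X hdom hpre
  obtain ⟨h0, hlen⟩ := hpre
  obtain ⟨n, rfl⟩ : ∃ n : Nat, N = (n : Int) := ⟨N.toNat, (Int.toNat_of_nonneg h0).symm⟩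
  have hn : n ≤ X.length := by exact_mod_cast hlen
  set M : Int := (n : Int) * 50 with hMdef
  have hM : (0 : Int) ≤ M := by positivity
  unfold Spec_editorial_2d editorial_2d editorial_2d_alt
  simp only []
  have hmid : PySem.Int.floordiv (2 * ((n : Int) * 50)) 2 = M := by
    rw [PySem.Int.floordiv_eq_ediv_of_pos (by omega)]; omega
  -- initial table of A is pvTable0
  have hmapconst : (PySem.List.pyRange 0 ((n : Int) + 1)).map
      (fun _ => PySem.List.pyRepeat [(0 : Int)] (2 * ((n : Int) * 50) + 1))
      = List.replicate (n + 1) (List.replicate (2 * M + 1).toNat 0) := by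
    rw [List.eq_replicate_iff]
    constructor
    · rw [List.length_map, PySem.List.length_pyRange_one]; omega
    · intro b hb
      rcases List.mem_map.1 hb with ⟨k, _, hk⟩
      rw [← hk, PySem.List.pyRepeat_singleton, hMdef]
  have htab0 : PySem.List.pySetD
      ((PySem.List.pyRange 0 ((n : Int) + 1)).map
        (fun _ => PySem.List.pyRepeat [(0 : Int)] (2 * ((n : Int) * 50) + 1))) 0
      (PySem.List.pySetD
        (PySem.List.pyGetD
          ((PySem.List.pyRange 0 ((n : Int) + 1)).map
            (fun _ => PySem.List.pyRepeat [(0 : Int)] (2 * ((n : Int) * 50) + 1))) 0 [])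
        (PySem.Int.floordiv (2 * ((n : Int) * 50)) 2) 1)
      = pvTable0 n M := by
    rw [hmapconst, hmid]
    rw [PySem.List.pyGetD_of_nonneg _ _ (le_refl 0)]
    rw [List.getD_eq_getElem _ _ (by simp), List.getElem_replicate]
    rw [PySem.List.pySetD_of_nonneg _ _ hM, PySem.List.pySetD_of_nonneg _ _ (le_refl 0)]
    rfl
  rw [htab0, hmid]
  have hstep : (fun (dp : List (List Int)) (i : Int) =>
      PySem.List.pySetD dp i
        (pvRowA (2 * ((n : Int) * 50)) (PySem.List.pyGetD X (i - 1) 0 - A)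
          (PySem.List.pyGetD dp (i - 1) []))) = pvStepA A M X := by
    funext dp i
    rw [pvStepA, hMdef]
  rw [hstep]
  have htab := (pvTable A X n hn M n (le_refl n)).2
  rw [htab]
  -- A's value is the middle entry of the final dense row = pvG over the cards from 0
  have hA : PySem.List.pyGetD (pvDense A M (X.take n) (pvRow0 M)) M 0
      = pvG A M (X.take n) 0 := by
    rw [← pvS_nil A M _ hM, pvS_dense, pvS_row0 A M _ hM]
  rw [hA]
  -- B's fuel n suffices and its memoized recursion is the plain pvG on X.take n
  have hB := pvWaysOK A M ((n : Int)) X (by omega) n 0 (by omega) (by omega) (by omega) 0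
    PySem.Dict.empty
    (by intro i sv v hv; rw [PySem.Dict.get?_empty] at hv; cases hv)
  simp only [Int.toNat_zero, List.drop_zero, Int.toNat_natCast] at hB
  rw [show Int.toNat ((n : Int)) = n by omega, ← hMdef, hB.1]
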